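-- pv_equiv track=rewrite | github.com/anupamkarn/lets_split | calculate_transaction.py | optimize_transaction
-- ===== SOURCE A (Python) =====
-- def optimize_transaction(transaction_list):
--
--     transactions = transaction_list['transaction_list']
--
--     graph_edges = {}
--     graph_weights = {}
--
--     for trans in transactions:
--
--         edge = '{0}-{1}'.format(trans[0],trans[1])
--         reverse_edge = '{0}-{1}'.format(trans[1],trans[0])
--
--         if trans[0] not in graph_edges:
--             graph_edges[trans[0]] = set()
--             graph_edges[trans[0]].add(trans[1])
--
--         else:
--             graph_edges[trans[0]].add(trans[1])
--
--         if edge in graph_weights.keys():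
--                 graph_weights[edge] += trans[2]
--         else:
--             graph_weights[edge] = trans[2]
--
--         if reverse_edge in graph_weights.keys():
--             if graph_weights[reverse_edge] >= graph_weights[edge]:
--                 if graph_weights[reverse_edge]-graph_weights[edge] == 0:
--                     del graph_weights[reverse_edge]
--                     del graph_weights[edge]
--                     graph_edges[trans[1]].discard(trans[0])
--                     graph_edges[trans[0]].discard(trans[1])
--                 else:
--                     graph_weights[reverse_edge] = graph_weights[reverse_edge] - graph_weights[edge]
--                     del graph_weights[edge]
--                     graph_edges[trans[0]].discard(trans[1])
--             else:
--                 graph_weights[edge] = graph_weights[edge] - graph_weights[reverse_edge]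
--                 del graph_weights[reverse_edge]
--                 graph_edges[trans[1]].discard(trans[0])
--
--     return graph_edges
-- ===== SOURCE B (Python) =====
-- def optimize_transaction(transaction_list):
--     transactions = transaction_list['transaction_list']
--     sources = []          # every node ever seen as a source, in first-appearance order
--     seen = set()
--     net = {}              # (src, dst) -> running signed net; at most one orientation per pair
--     for trans in transactions:
--         a, b, w = trans[0], trans[1], trans[2]
--         if a not in seen:
--             seen.add(a)
--             sources.append(a)
--         if (a, b) in net:
--             net[(a, b)] += w
--         elif (b, a) in net:
--             v = net[(b, a)] - w
--             if v > 0: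
--                 net[(b, a)] = v
--             else:
--                 del net[(b, a)]
--                 if v < 0:
--                     net[(a, b)] = -v
--         else:
--             net[(a, b)] = w
--     return {s: {d for (x, d) in net if x == s} for s in sources}
-- ===== Notes on version B (the rewrite author's own statement) =====
-- stated objective: simpler
-- what changed: B replaces A's interleaved maintenance of two dicts (a str->set edge graph mutated with add/discard and a '{src}-{dst}'-string-keyed weight dict with in-loop deletions) by a single pass that keeps one (src,dst)-tuple-keyed signed net per pair plus the first-appearance list of sources, and builds the whole edge graph in one final comprehension.
import Mathlib
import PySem

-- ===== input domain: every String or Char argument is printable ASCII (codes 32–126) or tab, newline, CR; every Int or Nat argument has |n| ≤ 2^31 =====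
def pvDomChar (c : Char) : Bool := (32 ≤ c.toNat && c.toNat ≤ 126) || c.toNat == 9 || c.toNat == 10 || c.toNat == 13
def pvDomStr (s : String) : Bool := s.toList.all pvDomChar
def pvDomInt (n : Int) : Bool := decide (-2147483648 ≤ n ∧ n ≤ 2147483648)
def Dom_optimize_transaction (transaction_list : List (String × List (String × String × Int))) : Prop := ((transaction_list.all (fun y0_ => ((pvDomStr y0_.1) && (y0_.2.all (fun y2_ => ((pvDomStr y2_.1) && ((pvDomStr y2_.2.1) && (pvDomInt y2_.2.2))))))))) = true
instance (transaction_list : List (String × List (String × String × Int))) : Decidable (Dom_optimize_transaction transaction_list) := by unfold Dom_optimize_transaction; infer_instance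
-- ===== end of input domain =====

-- B replaces A's interleaved mutation of two dicts (edge sets + '{src}-{dst}'-string-keyed weights)
-- by one (src,dst)-keyed signed net map and a final comprehension; same value on Pre_ (simpler, not faster).


-- ===== PORT A =====
-- '{0}-{1}'.format(x, y) on strings is concatenation; kept on List Char so the kernel can reduce it.
def pvEdgeKey (x y : String) : List Char := x.toList ++ '-' :: y.toList

-- One iteration of A's for-loop over (graph_edges, graph_weights).
-- Python's `graph_edges[trans[1]].discard(...)` raises KeyError when trans[1] is absent; inside Pre_
-- that key is always present, where Dict.modify is exact.
def pvAStep (st : PySem.Dict String (PySem.Set String) × PySem.Dict (List Char) Int)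
    (trans : String × String × Int) :
    PySem.Dict String (PySem.Set String) × PySem.Dict (List Char) Int :=
  let edge := pvEdgeKey trans.1 trans.2.1
  let reverse_edge := pvEdgeKey trans.2.1 trans.1
  let graph_edges :=
    if st.1.contains trans.1 = false then
      st.1.insert trans.1 (PySem.Set.add PySem.Set.empty trans.2.1)
    else
      st.1.modify trans.1 PySem.Set.empty (fun s => PySem.Set.add s trans.2.1)
  let graph_weights :=
    if st.2.contains edge then st.2.modify edge 0 (fun x => x + trans.2.2)
    else st.2.insert edge trans.2.2
  if graph_weights.contains reverse_edge then
    if graph_weights.getD reverse_edge 0 ≥ graph_weights.getD edge 0 then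
      if graph_weights.getD reverse_edge 0 - graph_weights.getD edge 0 = 0 then
        ((graph_edges.modify trans.2.1 PySem.Set.empty (fun s => PySem.Set.discard s trans.1)).modify
            trans.1 PySem.Set.empty (fun s => PySem.Set.discard s trans.2.1),
         (graph_weights.erase reverse_edge).erase edge)
      else
        (graph_edges.modify trans.1 PySem.Set.empty (fun s => PySem.Set.discard s trans.2.1),
         (graph_weights.insert reverse_edge
            (graph_weights.getD reverse_edge 0 - graph_weights.getD edge 0)).erase edge)
    else
      (graph_edges.modify trans.2.1 PySem.Set.empty (fun s => PySem.Set.discard s trans.1),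
       (graph_weights.insert edge
          (graph_weights.getD edge 0 - graph_weights.getD reverse_edge 0)).erase reverse_edge)
  else (graph_edges, graph_weights)

def optimize_transaction (transaction_list : List (String × List (String × String × Int))) : List (String × List String) :=
  let transactions := (PySem.Dict.mk transaction_list).getD "transaction_list" []
  let st := transactions.foldl pvAStep (PySem.Dict.empty, PySem.Dict.empty)
  st.1.items

-- ===== PORT B =====
-- One iteration of Source B's loop over (sources, seen, net).
def pvBStep (st : List String × PySem.Set String × PySem.Dict (String × String) Int)
    (trans : String × String × Int) :
    List String × PySem.Set String × PySem.Dict (String × String) Int :=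
  let a := trans.1
  let b := trans.2.1
  let w := trans.2.2
  let p := if st.2.1.contains a then (st.1, st.2.1) else (st.1 ++ [a], PySem.Set.add st.2.1 a)
  let net :=
    if st.2.2.contains (a, b) then st.2.2.modify (a, b) 0 (fun x => x + w)
    else if st.2.2.contains (b, a) then
      let v := st.2.2.getD (b, a) 0 - w
      if v > 0 then st.2.2.insert (b, a) v
      else
        let net' := st.2.2.erase (b, a)
        if v < 0 then net'.insert (a, b) (-v) else net'
    else st.2.2.insert (a, b) w
  (p.1, p.2, net)

def optimize_transaction_alt (transaction_list : List (String × List (String × String × Int))) : List (String × List String) :=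
  let transactions := (PySem.Dict.mk transaction_list).getD "transaction_list" []
  let st := transactions.foldl pvBStep ([], PySem.Set.empty, PySem.Dict.empty)
  st.1.map (fun s => (s, PySem.Set.ofList ((st.2.2.keys.filter (fun k => k.1 == s)).map (fun k => k.2))))

-- ===== PRECONDITION & SPEC =====
-- The ordered (src, dst) and (dst, src) pairs of the transactions, whose '{0}-{1}' strings A uses as keys.
def pvPairs (ts : List (String × String × Int)) : List (String × String) :=
  ts.flatMap (fun t => [(t.1, t.2.1), (t.2.1, t.1)])

-- Pre_ excludes (i) inputs without a 'transaction_list' key and self-loop transactions src = dst, on which A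
-- raises KeyError, and (ii) inputs where two distinct ordered node pairs yield the same '{src}-{dst}' string
-- (names containing '-'), on which A's string-keyed weights conflate distinct pairs (an accidental graph, or
-- a KeyError).
def Pre_optimize_transaction (transaction_list : List (String × List (String × String × Int))) : Prop :=
  (PySem.Dict.mk transaction_list).contains "transaction_list" = true ∧
  (∀ t ∈ (PySem.Dict.mk transaction_list).getD "transaction_list" [], t.1 ≠ t.2.1) ∧
  ∀ p ∈ pvPairs ((PySem.Dict.mk transaction_list).getD "transaction_list" []),
    ∀ q ∈ pvPairs ((PySem.Dict.mk transaction_list).getD "transaction_list" []),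
      pvEdgeKey p.1 p.2 = pvEdgeKey q.1 q.2 → p = q
instance (transaction_list : List (String × List (String × String × Int))) : Decidable (Pre_optimize_transaction transaction_list) := by unfold Pre_optimize_transaction; infer_instance

def pvWitness_optimize_transaction : (List (String × List (String × String × Int))) :=
  [("transaction_list", [("alice", "bob", (5 : Int)), ("bob", "alice", (2 : Int)), ("alice", "carol", (3 : Int))])]

def Spec_optimize_transaction (transaction_list : List (String × List (String × String × Int))) (out : List (String × List String)) : Prop := out = optimize_transaction_alt transaction_list
instance (transaction_list : List (String × List (String × String × Int))) (out : List (String × List String)) : Decidable (Spec_optimize_transaction transaction_list out) := by unfold Spec_optimize_transaction; infer_instance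

-- ===== CLAIM (what is proved, stated in full; the proofs are below) =====
def Claim_equal_optimize_transaction : Prop := ∀ (transaction_list : List (String × List (String × String × Int))), Dom_optimize_transaction transaction_list → Pre_optimize_transaction transaction_list → Spec_optimize_transaction transaction_list (optimize_transaction transaction_list)

-- ===== LEMMAS AND PROOFS =====

theorem pvGet?_erase {κ ν : Type} [BEq κ] [LawfulBEq κ] (d : PySem.Dict κ ν) (k k' : κ) [Decidable (k' = k)] :
    (d.erase k).get? k' = if k' = k then none else d.get? k' := by
  obtain ⟨l⟩ := d
  show (PySem.Dict.mk (List.filter (fun p => !p.1 == k) l)).get? k' = _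
  induction l with
  | nil => simp [PySem.Dict.get?]
  | cons p l ih =>
    obtain ⟨pk, pv⟩ := p
    rcases eq_or_ne pk k with hp | hp <;> rcases eq_or_ne pk k' with hq | hq <;>
      rcases eq_or_ne k' k with hk | hk <;>
      simp_all [PySem.Dict.get?_mk_cons]

theorem pvKeys_erase {κ ν : Type} [BEq κ] (d : PySem.Dict κ ν) (k : κ) :
    (d.erase k).keys = d.keys.filter (fun x => !(x == k)) := by
  obtain ⟨l⟩ := d
  show (List.filter (fun p => !p.1 == k) l).map (fun x => x.1) = _
  induction l with
  | nil => simp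
  | cons p l ih => by_cases hp : (p.1 == k) = true <;> simp [hp, ih, PySem.Dict.keys]

def pvCol (K : List (String × String)) (s : String) : List String :=
  (K.filter (fun k => k.1 == s)).map (fun k => k.2)

theorem pvCol_nil_of (K : List (String × String)) (S : List String) (t0 : String)
    (h5 : ∀ k ∈ K, k.1 ∈ S) (hm : t0 ∉ S) : pvCol K t0 = [] := by
  simp only [pvCol, List.map_eq_nil_iff, List.filter_eq_nil_iff]
  intro k hk e
  exact hm ((beq_iff_eq.mp e) ▸ h5 k hk)

theorem pvCol_cons (k1 k2 s : String) (K : List (String × String)) :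
    pvCol ((k1, k2) :: K) s = if k1 = s then k2 :: pvCol K s else pvCol K s := by
  by_cases h : k1 = s <;> simp [pvCol, h]

theorem pvCol_append (K : List (String × String)) (a b s : String) :
    pvCol (K ++ [(a, b)]) s = pvCol K s ++ (if a = s then [b] else []) := by
  by_cases h : a = s <;> simp [pvCol, List.filter_append, h]

theorem pvMem_col (K : List (String × String)) (s y : String) :
    y ∈ pvCol K s ↔ (s, y) ∈ K := by
  simp only [pvCol, List.mem_map, List.mem_filter]
  constructor
  · rintro ⟨k, ⟨hk, he⟩, hy⟩
    have : k = (s, y) := by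
      obtain ⟨k1, k2⟩ := k; simp at he hy; simp [he, hy]
    exact this ▸ hk
  · intro h; exact ⟨(s, y), ⟨h, by simp⟩, rfl⟩

theorem pvCol_erase (b a s : String) : ∀ K : List (String × String),
    pvCol (K.filter (fun x => !(x == (b, a)))) s =
      if s = b then (pvCol K b).filter (fun y => !(y == a)) else pvCol K s := by
  intro K
  induction K with
  | nil => by_cases h : s = b <;> simp [pvCol, h]
  | cons k K ih =>
    obtain ⟨k1, k2⟩ := k
    by_cases hk : (k1, k2) = (b, a)
    · rw [List.filter_cons_of_neg (by simp [hk])]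
      rw [ih]
      have hb : k1 = b := (Prod.mk.injEq .. ▸ hk).1
      have ha : k2 = a := (Prod.mk.injEq .. ▸ hk).2
      subst hb; subst ha
      by_cases hs : s = k1
      · rw [if_pos hs, if_pos hs, pvCol_cons, if_pos rfl]
        rw [List.filter_cons_of_neg (by simp)]
      · rw [if_neg hs, if_neg hs, pvCol_cons, if_neg (fun h => hs h.symm)]
    · rw [List.filter_cons_of_pos (by simp [hk])]
      have h2 : k1 = b → k2 ≠ a := fun e1 e2 => hk (by rw [e1, e2])
      rcases eq_or_ne s b with hs | hs <;> rcases eq_or_ne k1 s with h1 | h1 <;>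
        simp_all [pvCol_cons]

theorem pvKeys_of_items_map {ν : Type} (d : PySem.Dict String ν) (S : List String) (F : String → ν)
    (hd : d.items = S.map (fun s => (s, F s))) : d.keys = S := by
  simp only [PySem.Dict.keys, hd, List.map_map]
  exact List.map_id _

theorem pvContains_of_items_map {ν : Type} (d : PySem.Dict String ν) (S : List String) (F : String → ν)
    (hd : d.items = S.map (fun s => (s, F s))) (x : String) :
    d.contains x = true ↔ x ∈ S := by
  rw [PySem.Dict.contains_iff_mem_keys d x, pvKeys_of_items_map d S F hd]

theorem pvGet?_of_items_map {ν : Type} (d : PySem.Dict String ν) (S : List String) (F : String → ν)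
    (hd : d.items = S.map (fun s => (s, F s))) (hS : S.Nodup) (s : String) (hs : s ∈ S) :
    d.get? s = some (F s) := by
  refine PySem.Dict.get?_of_mem_items d ?_ ?_
  · rw [hd]; exact List.mem_map_of_mem hs
  · rw [pvKeys_of_items_map d S F hd]; exact hS

theorem pvGetD_of_items_map {ν : Type} (d : PySem.Dict String ν) (S : List String) (F : String → ν)
    (hd : d.items = S.map (fun s => (s, F s))) (hS : S.Nodup) (s : String) (hs : s ∈ S) (dflt : ν) :
    d.getD s dflt = F s := by
  simp [PySem.Dict.getD, pvGet?_of_items_map d S F hd hS s hs]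

theorem pvInsert_of_items_map {ν : Type} (d : PySem.Dict String ν) (S : List String) (F : String → ν)
    (hd : d.items = S.map (fun s => (s, F s))) (s : String) (hs : s ∈ S) (v : ν) :
    (d.insert s v).items = S.map (fun u => (u, if u = s then v else F u)) := by
  have hc : d.contains s = true := (pvContains_of_items_map d S F hd s).mpr hs
  rw [PySem.Dict.items_insert_of_contains d v hc, hd, List.map_map]
  refine List.map_congr_left (fun u _ => ?_)
  by_cases h : u = s <;> simp [h]

theorem pvInsert_of_items_map_fresh {ν : Type} (d : PySem.Dict String ν) (S : List String) (F : String → ν)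
    (hd : d.items = S.map (fun s => (s, F s))) (s : String) (hs : s ∉ S) (v : ν) :
    (d.insert s v).items = (S ++ [s]).map (fun u => (u, if u = s then v else F u)) := by
  have hc : d.contains s = false := by
    rw [← Bool.not_eq_true, pvContains_of_items_map d S F hd s]; exact hs
  rw [PySem.Dict.items_insert_of_not_contains d v hc, hd, List.map_append]
  congr 1
  · refine List.map_congr_left (fun u hu => ?_)
    have : u ≠ s := fun h => hs (h ▸ hu)
    simp [this]
  · simp

theorem pvCol_nodup (K : List (String × String)) (h : K.Nodup) (s : String) :
    (pvCol K s).Nodup := by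
  refine List.Nodup.map_on ?_ (h.filter _)
  intro x hx y hy e
  have hx1 : x.1 = s := beq_iff_eq.mp (List.mem_filter.mp hx).2
  have hy1 : y.1 = s := beq_iff_eq.mp (List.mem_filter.mp hy).2
  exact Prod.ext (hx1.trans hy1.symm) e

def pvGood (P : List (String × String)) (t : String × String × Int) : Prop :=
  t.1 ≠ t.2.1 ∧ (t.1, t.2.1) ∈ P ∧ (t.2.1, t.1) ∈ P

def pvInv (P : List (String × String)) (ge : PySem.Dict String (PySem.Set String))
    (gw : PySem.Dict (List Char) Int)
    (sources : List String) (seen : PySem.Set String)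
    (net : PySem.Dict (String × String) Int) : Prop :=
  seen = sources ∧
  sources.Nodup ∧
  net.keys.Nodup ∧
  (∀ k ∈ net.keys, k.1 ∈ sources) ∧
  (∀ k ∈ net.keys, (k.2, k.1) ∉ net.keys) ∧
  (∀ a b : String, (a, b) ∈ P → gw.get? (pvEdgeKey a b) = net.get? (a, b)) ∧
  ge.items = sources.map (fun s => (s, pvCol net.keys s))

theorem pvStep_inv (P : List (String × String))
    (hP : ∀ p ∈ P, ∀ q ∈ P, pvEdgeKey p.1 p.2 = pvEdgeKey q.1 q.2 → p = q)
    (ge : PySem.Dict String (PySem.Set String)) (gw : PySem.Dict (List Char) Int)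
    (sources : List String) (seen : PySem.Set String) (net : PySem.Dict (String × String) Int)
    (t : String × String × Int) (hI : pvInv P ge gw sources seen net) (hg : pvGood P t) :
    pvInv P (pvAStep (ge, gw) t).1 (pvAStep (ge, gw) t).2
      (pvBStep (sources, seen, net) t).1
      (pvBStep (sources, seen, net) t).2.1
      (pvBStep (sources, seen, net) t).2.2 := by
  obtain ⟨t0, t1, w⟩ := t
  obtain ⟨hseen, hndS, hndK, h5, h6, h7, hE⟩ := hI
  have hne : t0 ≠ t1 := hg.1
  have hmem0 : (t0, t1) ∈ P := hg.2.1
  have hmem1 : (t1, t0) ∈ P := hg.2.2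
  subst hseen
  have hedge_ne : pvEdgeKey t0 t1 ≠ pvEdgeKey t1 t0 := fun h =>
    hne (congrArg Prod.fst (hP (t0, t1) hmem0 (t1, t0) hmem1 h))
  have hgetmem : ∀ k : String × String, (net.get? k).isSome = true ↔ k ∈ net.keys := fun k => by
    rw [Option.isSome_iff_ne_none, ne_eq, PySem.Dict.get?_eq_none_iff_not_mem_keys net k]
    tauto
  have hgec : ge.contains t0 = true ↔ t0 ∈ seen :=
    pvContains_of_items_map ge seen _ hE t0
  have hsc : PySem.Set.contains seen t0 = true ↔ t0 ∈ seen := PySem.Set.contains_iff seen t0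
  have hkeyiff : ∀ a b c d : String, (a, b) ∈ P → (c, d) ∈ P →
      (pvEdgeKey a b = pvEdgeKey c d) = ((a, b) = (c, d)) := by
    intro a b c d hp hq
    apply propext
    constructor
    · exact fun h => hP (a, b) hp (c, d) hq h
    · intro h
      obtain ⟨e1, e2⟩ := Prod.mk.injEq .. ▸ h
      rw [e1, e2]
  have hpne1 : ((t0, t1) : String × String) ≠ (t1, t0) := fun h => hne (congrArg Prod.fst h)
  have hpne2 : ((t1, t0) : String × String) ≠ (t0, t1) := fun h => hne (congrArg Prod.fst h).symm
  by_cases hab : (t0, t1) ∈ net.keys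
  · -- same-direction transaction: both sides just accumulate
    have hba : (t1, t0) ∉ net.keys := h6 (t0, t1) hab
    have ht0S : t0 ∈ seen := h5 (t0, t1) hab
    have hnetc : net.contains (t0, t1) = true := (PySem.Dict.contains_iff_mem_keys net _).mpr hab
    have hBeq : pvBStep (seen, seen, net) (t0, t1, w) =
        (seen, seen, net.modify (t0, t1) 0 (fun x => x + w)) := by
      simp only [pvBStep, hnetc, hsc.mpr ht0S]
      simp
    obtain ⟨n, hn⟩ : ∃ n, net.get? (t0, t1) = some n :=
      Option.isSome_iff_exists.mp ((hgetmem (t0, t1)).mpr hab)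
    have hgwc : gw.contains (pvEdgeKey t0 t1) = true := by
      rw [PySem.Dict.contains_eq_isSome_get?, h7 t0 t1 hmem0, hn]; rfl
    have hgw1get_rev :
        (gw.modify (pvEdgeKey t0 t1) 0 (fun x => x + w)).get? (pvEdgeKey t1 t0) = none := by
      simp only [PySem.Dict.modify]
      rw [PySem.Dict.get?_insert, if_neg (Ne.symm hedge_ne), h7 t1 t0 hmem1]
      exact (PySem.Dict.get?_eq_none_iff_not_mem_keys net _).mpr hba
    have hgwc2 :
        (gw.modify (pvEdgeKey t0 t1) 0 (fun x => x + w)).contains (pvEdgeKey t1 t0) = false := by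
      rw [PySem.Dict.contains_eq_isSome_get?, hgw1get_rev]; rfl
    have hgect : ge.contains t0 = true := hgec.mpr ht0S
    have hAeq : pvAStep (ge, gw) (t0, t1, w) =
        (ge.modify t0 PySem.Set.empty (fun s => PySem.Set.add s t1),
         gw.modify (pvEdgeKey t0 t1) 0 (fun x => x + w)) := by
      have c1 : ¬ (ge.contains t0 = false) := by simp [hgect]
      have c3 : ¬ ((gw.modify (pvEdgeKey t0 t1) 0 (fun x => x + w)).contains
          (pvEdgeKey t1 t0) = true) := by simp [hgwc2]
      simp only [pvAStep]
      rw [if_neg c1, if_pos hgwc, if_neg c3]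
    rw [hAeq, hBeq]
    have hkeys' : (net.modify (t0, t1) 0 (fun x => x + w)).keys = net.keys := by
      rw [PySem.Dict.keys_modify, PySem.Dict.keys_insert_of_contains net _ hnetc]
    refine ⟨rfl, hndS, ?_, ?_, ?_, ?_, ?_⟩
    · rw [hkeys']; exact hndK
    · rw [hkeys']; exact h5
    · intro k hk
      rw [hkeys'] at hk ⊢
      exact h6 k hk
    · intro a b hp
      simp only [PySem.Dict.modify]
      rw [PySem.Dict.get?_insert, PySem.Dict.get?_insert]
      by_cases hk : (a, b) = (t0, t1)
      · obtain ⟨e1, e2⟩ := Prod.mk.injEq .. ▸ hk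
        subst e1; subst e2
        rw [if_pos rfl, if_pos rfl]
        have h1 : gw.getD (pvEdgeKey a b) 0 = n := by
          rw [PySem.Dict.getD, h7 a b hp, hn]; rfl
        have h2 : net.getD (a, b) 0 = n := by rw [PySem.Dict.getD, hn]; rfl
        rw [h1, h2]
      · have hkey : pvEdgeKey a b ≠ pvEdgeKey t0 t1 := fun h =>
          hk (hP (a, b) hp (t0, t1) hmem0 h)
        rw [if_neg hkey, if_neg hk]
        exact h7 a b hp
    · have ht1mem : t1 ∈ pvCol net.keys t0 := (pvMem_col _ _ _).mpr hab
      simp only [PySem.Dict.modify]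
      rw [pvGetD_of_items_map ge seen _ hE hndS t0 ht0S, PySem.Set.add_of_mem ht1mem,
        pvInsert_of_items_map ge seen _ hE t0 ht0S _,
        PySem.Dict.keys_insert_of_contains net _ hnetc]
      refine List.map_congr_left (fun u hu => ?_)
      by_cases h : u = t0 <;> simp [h]
  · -- (t0,t1) not netted yet
    have ht1nm : t1 ∉ pvCol net.keys t0 := fun h => hab ((pvMem_col _ _ _).mp h)
    have hnetc : net.contains (t0, t1) = false := by
      rw [← Bool.not_eq_true, PySem.Dict.contains_iff_mem_keys net _]; exact hab
    have hgwce : gw.contains (pvEdgeKey t0 t1) = false := by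
      rw [PySem.Dict.contains_eq_isSome_get?, h7 t0 t1 hmem0,
        (PySem.Dict.get?_eq_none_iff_not_mem_keys net _).mpr hab]; rfl
    -- A's first phase on graph_edges, and B's sources/seen update, described uniformly
    obtain ⟨S', hS'items, hS'nd, hS't0, hS'sub, hS'new, hBp⟩ :
        ∃ S' : List String,
          (if ge.contains t0 = false then ge.insert t0 (PySem.Set.add PySem.Set.empty t1)
           else ge.modify t0 PySem.Set.empty (fun s => PySem.Set.add s t1)).items =
            S'.map (fun u => (u, if u = t0 then pvCol net.keys t0 ++ [t1] else pvCol net.keys u)) ∧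
          S'.Nodup ∧ t0 ∈ S' ∧ (∀ x ∈ seen, x ∈ S') ∧ (∀ x ∈ S', x = t0 ∨ x ∈ seen) ∧
          (if seen.contains t0 then (seen, seen) else (seen ++ [t0], PySem.Set.add seen t0))
            = (S', S') := by
      by_cases hm : t0 ∈ seen
      · refine ⟨seen, ?_, hndS, hm, fun x h => h, fun x h => Or.inr h, ?_⟩
        · rw [if_neg (by simp [hgec.mpr hm])]
          simp only [PySem.Dict.modify]
          rw [pvGetD_of_items_map ge seen _ hE hndS t0 hm,
            PySem.Set.add_of_not_mem ht1nm, pvInsert_of_items_map ge seen _ hE t0 hm _]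
        · rw [if_pos (hsc.mpr hm)]
      · refine ⟨seen ++ [t0], ?_, ?_, by simp, fun x h => by simp [h], ?_, ?_⟩
        · rw [if_pos (by rw [← Bool.not_eq_true]; simpa [hgec] using hm)]
          have : PySem.Set.add PySem.Set.empty t1 = pvCol net.keys t0 ++ [t1] := by
            rw [pvCol_nil_of net.keys seen t0 h5 hm]
            simp [PySem.Set.add, PySem.Set.empty, PySem.Set.contains]
          rw [this, pvInsert_of_items_map_fresh ge seen _ hE t0 hm _]
        · simp [List.nodup_append, hndS]
          exact fun a ha h => hm (h ▸ ha)
        · intro x hx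
          rcases List.mem_append.mp hx with h | h
          · exact Or.inr h
          · exact Or.inl (by simpa using h)
        · rw [if_neg (by simpa [hsc] using hm), PySem.Set.add_of_not_mem hm]
    by_cases hba : (t1, t0) ∈ net.keys
    · -- netting against the reverse edge
      have ht1S : t1 ∈ seen := h5 (t1, t0) hba
      have ht1S' : t1 ∈ S' := hS'sub _ ht1S
      have hnetc2 : net.contains (t1, t0) = true := (PySem.Dict.contains_iff_mem_keys net _).mpr hba
      obtain ⟨n, hn⟩ : ∃ n, net.get? (t1, t0) = some n :=
        Option.isSome_iff_exists.mp ((hgetmem (t1, t0)).mpr hba)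
      have hnD : net.getD (t1, t0) 0 = n := PySem.Dict.getD_of_get?_eq_some net 0 hn
      have c2 : ¬ (gw.contains (pvEdgeKey t0 t1) = true) := by simp [hgwce]
      have hgw1rev : (gw.insert (pvEdgeKey t0 t1) w).get? (pvEdgeKey t1 t0) = some n := by
        rw [PySem.Dict.get?_insert, if_neg (Ne.symm hedge_ne), h7 t1 t0 hmem1, hn]
      have hc3 : (gw.insert (pvEdgeKey t0 t1) w).contains (pvEdgeKey t1 t0) = true := by
        rw [PySem.Dict.contains_eq_isSome_get?, hgw1rev]; rfl
      have hre : (gw.insert (pvEdgeKey t0 t1) w).getD (pvEdgeKey t1 t0) 0 = n :=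
        PySem.Dict.getD_of_get?_eq_some _ 0 hgw1rev
      have hee : (gw.insert (pvEdgeKey t0 t1) w).getD (pvEdgeKey t0 t1) 0 = w := by
        rw [PySem.Dict.getD_insert_self]
      have hdisc : PySem.Set.discard (pvCol net.keys t0 ++ [t1]) t1 = pvCol net.keys t0 := by
        simp only [PySem.Set.discard, List.filter_append]
        rw [List.filter_eq_self.mpr (fun y hy => by
          simp only [Bool.not_eq_eq_eq_not, Bool.not_true, beq_eq_false_iff_ne, ne_eq]
          exact fun e => ht1nm (e ▸ hy))]
        simp
      -- the A-side state after its weights phase, before the comparison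
      have hAmid : pvAStep (ge, gw) (t0, t1, w) =
          (if n ≥ w then
            if n - w = 0 then
              (((if ge.contains t0 = false then ge.insert t0 (PySem.Set.add PySem.Set.empty t1)
                else ge.modify t0 PySem.Set.empty (fun s => PySem.Set.add s t1)).modify t1
                  PySem.Set.empty (fun s => PySem.Set.discard s t0)).modify t0
                  PySem.Set.empty (fun s => PySem.Set.discard s t1),
               ((gw.insert (pvEdgeKey t0 t1) w).erase (pvEdgeKey t1 t0)).erase (pvEdgeKey t0 t1))
            else
              ((if ge.contains t0 = false then ge.insert t0 (PySem.Set.add PySem.Set.empty t1)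
                else ge.modify t0 PySem.Set.empty (fun s => PySem.Set.add s t1)).modify t0
                  PySem.Set.empty (fun s => PySem.Set.discard s t1),
               ((gw.insert (pvEdgeKey t0 t1) w).insert (pvEdgeKey t1 t0) (n - w)).erase
                 (pvEdgeKey t0 t1))
          else
            ((if ge.contains t0 = false then ge.insert t0 (PySem.Set.add PySem.Set.empty t1)
              else ge.modify t0 PySem.Set.empty (fun s => PySem.Set.add s t1)).modify t1
                PySem.Set.empty (fun s => PySem.Set.discard s t0),
             ((gw.insert (pvEdgeKey t0 t1) w).insert (pvEdgeKey t0 t1) (w - n)).erase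
               (pvEdgeKey t1 t0))) := by
        simp only [pvAStep]
        rw [if_neg c2, if_pos hc3, hre, hee]
      rcases lt_trichotomy (n - w) 0 with hv | hv | hv
      · -- v < 0: direction flips to (t0, t1)
        have hwn : -(n - w) = w - n := by ring
        have hBeq : pvBStep (seen, seen, net) (t0, t1, w) =
            (S', S', (net.erase (t1, t0)).insert (t0, t1) (w - n)) := by
          simp only [pvBStep, hnetc, hnetc2, hBp, hnD]
          simp only [Bool.false_eq_true, if_false, if_true, gt_iff_lt]
          rw [if_neg (by omega : ¬ ((0 : Int) < n - w)), if_pos (hv : n - w < 0), hwn]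
        have hAeq : pvAStep (ge, gw) (t0, t1, w) =
            ((if ge.contains t0 = false then ge.insert t0 (PySem.Set.add PySem.Set.empty t1)
              else ge.modify t0 PySem.Set.empty (fun s => PySem.Set.add s t1)).modify t1
                PySem.Set.empty (fun s => PySem.Set.discard s t0),
             ((gw.insert (pvEdgeKey t0 t1) w).insert (pvEdgeKey t0 t1) (w - n)).erase
               (pvEdgeKey t1 t0)) := by
          rw [hAmid, if_neg (by omega : ¬ (n ≥ w))]
        rw [hAeq, hBeq]
        have hec : (net.erase (t1, t0)).contains (t0, t1) = false := by
          rw [PySem.Dict.contains_eq_isSome_get?, pvGet?_erase, if_neg hpne1,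
            (PySem.Dict.get?_eq_none_iff_not_mem_keys net _).mpr hab]
          rfl
        have hkeys' : ((net.erase (t1, t0)).insert (t0, t1) (w - n)).keys =
            net.keys.filter (fun x => !(x == (t1, t0))) ++ [(t0, t1)] := by
          rw [PySem.Dict.keys_insert_of_not_contains _ _ hec, pvKeys_erase]
        refine ⟨rfl, hS'nd, ?_, ?_, ?_, ?_, ?_⟩
        · rw [hkeys']
          refine List.Nodup.append (hndK.filter _) (List.nodup_singleton _) ?_
          intro k hk1 hk2
          rw [List.mem_singleton] at hk2
          exact hab (hk2 ▸ List.mem_of_mem_filter hk1)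
        · intro k hk
          rw [hkeys'] at hk
          rcases List.mem_append.mp hk with h | h
          · exact hS'sub _ (h5 k (List.mem_of_mem_filter h))
          · simp at h; rw [h]; exact hS't0
        · intro k hk
          rw [hkeys'] at hk ⊢
          intro hc
          rcases List.mem_append.mp hk with h | h
          · rcases List.mem_append.mp hc with h2 | h2
            · exact h6 k (List.mem_of_mem_filter h) (List.mem_of_mem_filter h2)
            · simp at h2
              have hk10 : k = (t1, t0) := by
                obtain ⟨k1, k2⟩ := k
                simp at h2 ⊢
                exact ⟨by rw [h2.2], by rw [h2.1]⟩
              rw [hk10] at h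
              simp [List.mem_filter] at h
          · simp at h
            rw [h] at hc
            rcases List.mem_append.mp hc with h2 | h2
            · have := (List.mem_filter.mp h2).2
              simp at this
            · exact hpne2 (List.mem_singleton.mp h2)
        · intro a b hp
          dsimp only
          rw [pvGet?_erase]
          simp only [hkeyiff a b t1 t0 hp hmem1]
          rw [PySem.Dict.get?_insert]
          simp only [hkeyiff a b t0 t1 hp hmem0]
          rw [PySem.Dict.get?_insert]
          simp only [hkeyiff a b t0 t1 hp hmem0]
          rw [PySem.Dict.get?_insert, pvGet?_erase]
          by_cases h1 : (a, b) = (t0, t1)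
          · rw [if_neg (by rw [h1]; exact hpne1), if_pos h1, if_pos h1]
          · rw [if_neg h1, if_neg h1]
            by_cases h2 : (a, b) = (t1, t0)
            · rw [if_pos h2, if_pos h2, if_neg h1]
            · rw [if_neg h2, if_neg h1, if_neg h2]
              exact h7 a b hp
        · dsimp only
          set GE := (if ge.contains t0 = false then ge.insert t0 (PySem.Set.add PySem.Set.empty t1)
            else ge.modify t0 PySem.Set.empty (fun s => PySem.Set.add s t1)) with hGEdef
          simp only [PySem.Dict.modify]
          have hgd1 : GE.getD t1 PySem.Set.empty = pvCol net.keys t1 := by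
            rw [pvGetD_of_items_map GE S' _ hS'items hS'nd t1 ht1S', if_neg (fun e => hne e.symm)]
          rw [hgd1, pvInsert_of_items_map GE S' _ hS'items t1 ht1S' _, hkeys']
          refine List.map_congr_left (fun u hu => ?_)
          rw [pvCol_append, pvCol_erase]
          by_cases h : u = t0 <;> by_cases h2 : u = t1 <;>
            simp_all [PySem.Set.discard, Ne.symm hne]
          exact fun e => h e.symm
      · -- v = 0: the pair cancels completely
        have hBeq : pvBStep (seen, seen, net) (t0, t1, w) = (S', S', net.erase (t1, t0)) := by
          simp only [pvBStep, hnetc, hnetc2, hBp, hnD]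
          simp only [Bool.false_eq_true, if_false, if_true, gt_iff_lt]
          rw [if_neg (by omega : ¬ ((0 : Int) < n - w)), if_neg (by omega : ¬ (n - w < 0))]
        have hAeq : pvAStep (ge, gw) (t0, t1, w) =
            (((if ge.contains t0 = false then ge.insert t0 (PySem.Set.add PySem.Set.empty t1)
              else ge.modify t0 PySem.Set.empty (fun s => PySem.Set.add s t1)).modify t1
                PySem.Set.empty (fun s => PySem.Set.discard s t0)).modify t0
                PySem.Set.empty (fun s => PySem.Set.discard s t1),
             ((gw.insert (pvEdgeKey t0 t1) w).erase (pvEdgeKey t1 t0)).erase (pvEdgeKey t0 t1)) := by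
          rw [hAmid, if_pos (by omega : n ≥ w), if_pos (hv : n - w = 0)]
        rw [hAeq, hBeq]
        have hkeys' : (net.erase (t1, t0)).keys = net.keys.filter (fun x => !(x == (t1, t0))) :=
          pvKeys_erase net _
        refine ⟨rfl, hS'nd, ?_, ?_, ?_, ?_, ?_⟩
        · rw [hkeys']; exact hndK.filter _
        · intro k hk
          rw [hkeys'] at hk
          exact hS'sub _ (h5 k (List.mem_of_mem_filter hk))
        · intro k hk
          rw [hkeys'] at hk ⊢
          intro hc
          exact h6 k (List.mem_of_mem_filter hk) (List.mem_of_mem_filter hc)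
        · intro a b hp
          dsimp only
          rw [pvGet?_erase]
          simp only [hkeyiff a b t0 t1 hp hmem0]
          rw [pvGet?_erase]
          simp only [hkeyiff a b t1 t0 hp hmem1]
          rw [PySem.Dict.get?_insert]
          simp only [hkeyiff a b t0 t1 hp hmem0]
          rw [pvGet?_erase]
          by_cases h1 : (a, b) = (t0, t1)
          · rw [if_pos h1, if_neg (by rw [h1]; exact hpne1), h1]
            exact ((PySem.Dict.get?_eq_none_iff_not_mem_keys net _).mpr hab).symm
          · rw [if_neg h1]
            by_cases h2 : (a, b) = (t1, t0)
            · rw [if_pos h2, if_pos h2]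
            · rw [if_neg h2, if_neg h2, if_neg h1]
              exact h7 a b hp
        · dsimp only
          set GE := (if ge.contains t0 = false then ge.insert t0 (PySem.Set.add PySem.Set.empty t1)
            else ge.modify t0 PySem.Set.empty (fun s => PySem.Set.add s t1)) with hGEdef
          simp only [PySem.Dict.modify]
          have hgd1 : GE.getD t1 PySem.Set.empty = pvCol net.keys t1 := by
            rw [pvGetD_of_items_map GE S' _ hS'items hS'nd t1 ht1S', if_neg (fun e => hne e.symm)]
          rw [hgd1]
          have hitems1 := pvInsert_of_items_map GE S' _ hS'items t1 ht1S'
            (PySem.Set.discard (pvCol net.keys t1) t0)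
          have hgd2 : (GE.insert t1 (PySem.Set.discard (pvCol net.keys t1) t0)).getD t0
              PySem.Set.empty = pvCol net.keys t0 ++ [t1] := by
            rw [pvGetD_of_items_map _ S' _ hitems1 hS'nd t0 hS't0, if_neg hne, if_pos rfl]
          rw [hgd2, hdisc, pvInsert_of_items_map _ S' _ hitems1 t0 hS't0 _, hkeys']
          refine List.map_congr_left (fun u hu => ?_)
          rw [pvCol_erase]
          by_cases h : u = t0 <;> by_cases h2 : u = t1 <;>
            simp_all [PySem.Set.discard]
      · -- v > 0: reverse edge survives with the difference
        have hBeq : pvBStep (seen, seen, net) (t0, t1, w) =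
            (S', S', net.insert (t1, t0) (n - w)) := by
          simp only [pvBStep, hnetc, hnetc2, hBp, hnD]
          simp only [Bool.false_eq_true, if_false, if_true, gt_iff_lt]
          rw [if_pos (by omega : (0 : Int) < n - w)]
        have hAeq : pvAStep (ge, gw) (t0, t1, w) =
            ((if ge.contains t0 = false then ge.insert t0 (PySem.Set.add PySem.Set.empty t1)
              else ge.modify t0 PySem.Set.empty (fun s => PySem.Set.add s t1)).modify t0
                PySem.Set.empty (fun s => PySem.Set.discard s t1),
             ((gw.insert (pvEdgeKey t0 t1) w).insert (pvEdgeKey t1 t0) (n - w)).erase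
               (pvEdgeKey t0 t1)) := by
          rw [hAmid, if_pos (by omega : n ≥ w), if_neg (by omega : ¬ (n - w = 0))]
        rw [hAeq, hBeq]
        have hkeys' : (net.insert (t1, t0) (n - w)).keys = net.keys :=
          PySem.Dict.keys_insert_of_contains net _ hnetc2
        refine ⟨rfl, hS'nd, ?_, ?_, ?_, ?_, ?_⟩
        · rw [hkeys']; exact hndK
        · intro k hk; rw [hkeys'] at hk; exact hS'sub _ (h5 k hk)
        · intro k hk; rw [hkeys'] at hk ⊢; exact h6 k hk
        · intro a b hp
          dsimp only
          rw [pvGet?_erase]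
          simp only [hkeyiff a b t0 t1 hp hmem0]
          rw [PySem.Dict.get?_insert]
          simp only [hkeyiff a b t1 t0 hp hmem1]
          rw [PySem.Dict.get?_insert]
          simp only [hkeyiff a b t0 t1 hp hmem0]
          rw [PySem.Dict.get?_insert]
          by_cases h1 : (a, b) = (t0, t1)
          · rw [if_pos h1, if_neg (by rw [h1]; exact hpne1), h1]
            exact ((PySem.Dict.get?_eq_none_iff_not_mem_keys net _).mpr hab).symm
          · rw [if_neg h1]
            by_cases h2 : (a, b) = (t1, t0)
            · rw [if_pos h2, if_pos h2]
            · rw [if_neg h2, if_neg h2, if_neg h1]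
              exact h7 a b hp
        · dsimp only
          set GE := (if ge.contains t0 = false then ge.insert t0 (PySem.Set.add PySem.Set.empty t1)
            else ge.modify t0 PySem.Set.empty (fun s => PySem.Set.add s t1)) with hGEdef
          simp only [PySem.Dict.modify]
          rw [pvGetD_of_items_map GE S' _ hS'items hS'nd t0 hS't0, if_pos rfl, hdisc,
            pvInsert_of_items_map GE S' _ hS'items t0 hS't0 _, hkeys']
          refine List.map_congr_left (fun u hu => ?_)
          by_cases h : u = t0 <;> simp [h]
    · -- brand-new pair: both sides append
      have hnetc2 : net.contains (t1, t0) = false := by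
        rw [← Bool.not_eq_true, PySem.Dict.contains_iff_mem_keys net _]; exact hba
      have hBeq : pvBStep (seen, seen, net) (t0, t1, w) = (S', S', net.insert (t0, t1) w) := by
        simp only [pvBStep, hnetc, hnetc2, hBp]
        simp
      have hgw1rev : (gw.insert (pvEdgeKey t0 t1) w).get? (pvEdgeKey t1 t0) = none := by
        rw [PySem.Dict.get?_insert, if_neg (Ne.symm hedge_ne), h7 t1 t0 hmem1]
        exact (PySem.Dict.get?_eq_none_iff_not_mem_keys net _).mpr hba
      have c3 : ¬ ((gw.insert (pvEdgeKey t0 t1) w).contains (pvEdgeKey t1 t0) = true) := by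
        rw [PySem.Dict.contains_eq_isSome_get?, hgw1rev]; simp
      have hAeq : pvAStep (ge, gw) (t0, t1, w) =
          ((if ge.contains t0 = false then ge.insert t0 (PySem.Set.add PySem.Set.empty t1)
            else ge.modify t0 PySem.Set.empty (fun s => PySem.Set.add s t1)),
           gw.insert (pvEdgeKey t0 t1) w) := by
        have c2 : ¬ (gw.contains (pvEdgeKey t0 t1) = true) := by simp [hgwce]
        simp only [pvAStep]
        rw [if_neg c2, if_neg c3]
      rw [hAeq, hBeq]
      have hkeys' : (net.insert (t0, t1) w).keys = net.keys ++ [(t0, t1)] :=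
        PySem.Dict.keys_insert_of_not_contains net _ hnetc
      refine ⟨rfl, hS'nd, ?_, ?_, ?_, ?_, ?_⟩
      · rw [hkeys']
        simp [List.nodup_append, hndK]
        exact fun x y hmem e1 e2 => hab (by rw [← e1, ← e2]; exact hmem)
      · intro k hk
        rw [hkeys'] at hk
        rcases List.mem_append.mp hk with h | h
        · exact hS'sub _ (h5 k h)
        · simp at h; rw [h]; exact hS't0
      · intro k hk
        rw [hkeys'] at hk ⊢
        rcases List.mem_append.mp hk with h | h
        · intro hc
          rcases List.mem_append.mp hc with h2 | h2
          · exact h6 k h h2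
          · simp at h2
            have : k = (t1, t0) := by
              obtain ⟨k1, k2⟩ := k
              simp at h2 ⊢
              exact ⟨by rw [h2.2], by rw [h2.1]⟩
            exact hba (this ▸ h)
        · simp at h
          intro hc
          rw [h] at hc
          simp at hc
          rcases hc with h2 | h2
          · exact hba h2
          · exact hne h2.2
      · intro a b hp
        rw [PySem.Dict.get?_insert, PySem.Dict.get?_insert]
        by_cases hk : (a, b) = (t0, t1)
        · obtain ⟨e1, e2⟩ := Prod.mk.injEq .. ▸ hk
          subst e1; subst e2
          rw [if_pos rfl, if_pos rfl]
        · have hkey : pvEdgeKey a b ≠ pvEdgeKey t0 t1 := fun h =>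
            hk (hP (a, b) hp (t0, t1) hmem0 h)
          rw [if_neg hkey, if_neg hk]
          exact h7 a b hp
      · rw [hS'items, hkeys']
        refine List.map_congr_left (fun u hu => ?_)
        rw [pvCol_append]
        by_cases h : u = t0
        · rw [if_pos h, if_pos (by rw [h]), h]
        · rw [if_neg h, if_neg (fun e => h e.symm)]
          simp
theorem pvFold_inv (P : List (String × String))
    (hP : ∀ p ∈ P, ∀ q ∈ P, pvEdgeKey p.1 p.2 = pvEdgeKey q.1 q.2 → p = q)
    (ts : List (String × String × Int)) :
    ∀ ge gw sources seen net, pvInv P ge gw sources seen net → (∀ t ∈ ts, pvGood P t) →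
    pvInv P (ts.foldl pvAStep (ge, gw)).1 (ts.foldl pvAStep (ge, gw)).2
      (ts.foldl pvBStep (sources, seen, net)).1
      (ts.foldl pvBStep (sources, seen, net)).2.1
      (ts.foldl pvBStep (sources, seen, net)).2.2 := by
  induction ts with
  | nil => intro ge gw sources seen net h _; exact h
  | cons t ts ih =>
    intro ge gw sources seen net h hg
    simp only [List.foldl_cons]
    have h' := pvStep_inv P hP ge gw sources seen net t h (hg t (by simp))
    have h2 := ih (pvAStep (ge, gw) t).1 (pvAStep (ge, gw) t).2
      (pvBStep (sources, seen, net) t).1 (pvBStep (sources, seen, net) t).2.1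
      (pvBStep (sources, seen, net) t).2.2 h' (fun u hu => hg u (by simp [hu]))
    simpa using h2

-- ===== VERDICT (by name: the statement is the Claim_ definition above) =====
theorem optimize_transaction_spec : Claim_equal_optimize_transaction := by
  intro tl _ hpre
  unfold Spec_optimize_transaction optimize_transaction optimize_transaction_alt
  have hInv0 : pvInv (pvPairs ((PySem.Dict.mk tl).getD "transaction_list" []))
      PySem.Dict.empty PySem.Dict.empty [] PySem.Set.empty PySem.Dict.empty := by
    refine ⟨rfl, List.nodup_nil, ?_, ?_, ?_, ?_, ?_⟩ <;>
      simp [PySem.Dict.keys, PySem.Dict.empty, PySem.Dict.get?]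
  have hfold := pvFold_inv (pvPairs ((PySem.Dict.mk tl).getD "transaction_list" []))
    hpre.2.2 ((PySem.Dict.mk tl).getD "transaction_list" [])
    PySem.Dict.empty PySem.Dict.empty [] PySem.Set.empty PySem.Dict.empty hInv0
    (fun t ht => ⟨hpre.2.1 t ht, by
      simp only [pvPairs, List.mem_flatMap]
      exact ⟨t, ht, by simp⟩, by
      simp only [pvPairs, List.mem_flatMap]
      exact ⟨t, ht, by simp⟩⟩)
  obtain ⟨hseen, hndS, hndK, h5, h6, h7, hE⟩ := hfold
  rw [hE]
  refine List.map_congr_left (fun s hs => ?_)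
  have : ((((PySem.Dict.mk tl).getD "transaction_list" []).foldl pvBStep
      ([], PySem.Set.empty, PySem.Dict.empty)).2.2.keys.filter (fun k => k.1 == s)).map
        (fun k => k.2) = pvCol ((((PySem.Dict.mk tl).getD "transaction_list" []).foldl pvBStep
      ([], PySem.Set.empty, PySem.Dict.empty)).2.2.keys) s := rfl
  rw [this, PySem.Set.ofList_eq_self_of_nodup _ (pvCol_nodup _ hndK s)]
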